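-- pv_equiv track=rewrite | github.com/DavidGBUF/Codigos_Prog1_Hidaka | Lista 1_Hidaka_funções_e_contagem/funções.py | lista_primos_maiores
-- ===== SOURCE A (Python) =====
-- def lista_primos_maiores(lista):
--     """
--     Dada uma lista de numeros inteiros, cria uma lista formada pelos menores numeros primos que são maiores que os numeros de mesmo indice
--     da lista original
--
--     Argumentos:
--     lista de inteiros
--
--     retorno:
--     lista de inteiros de numeros primos
--
--     """
--     lista_auxiliar = []
--     for item in lista:
--         while True:
--             item += 1
--             cont = 0
--
--             for i in range(1, item+1):
--                 if item % i == 0: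
--                     cont += 1
--             if cont == 2:
--                 lista_auxiliar.append(item)
--                 break
--     return lista_auxiliar
-- ===== SOURCE B (Python) =====
-- def _eh_primo(n):
--     if n < 4:
--         return n >= 2
--     if n % 2 == 0:
--         return False
--     d = 3
--     while d * d <= n:
--         if n % d == 0:
--             return False
--         d += 2
--     return True
--
--
-- def _proximo_primo(item):
--     c = item + 1 if item + 1 > 2 else 2
--     while not _eh_primo(c):
--         c += 1
--     return c
--
--
-- def lista_primos_maiores(lista):
--     return [_proximo_primo(item) for item in lista]
-- ===== Notes on version B (the rewrite author's own statement) =====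
-- stated objective: faster
-- what changed: A counts all divisors of every candidate by scanning 1..candidate; B tests each candidate for primality by trial division with only odd divisors up to sqrt(candidate), stopping at the first divisor found, and starts the search directly at max(2, item+1).
import Mathlib
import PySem

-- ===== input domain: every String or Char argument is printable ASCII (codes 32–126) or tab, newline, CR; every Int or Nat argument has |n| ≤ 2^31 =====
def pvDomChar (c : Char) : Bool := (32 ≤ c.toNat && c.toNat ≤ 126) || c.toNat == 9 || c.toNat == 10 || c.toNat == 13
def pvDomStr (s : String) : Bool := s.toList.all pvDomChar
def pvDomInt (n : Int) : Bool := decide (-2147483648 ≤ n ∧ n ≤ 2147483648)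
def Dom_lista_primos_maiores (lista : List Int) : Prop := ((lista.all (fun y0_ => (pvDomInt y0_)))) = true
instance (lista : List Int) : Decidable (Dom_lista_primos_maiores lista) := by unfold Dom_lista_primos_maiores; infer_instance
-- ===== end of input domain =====

-- B replaces A's per-candidate full divisor count by a trial-division primality
-- test that stops at the first divisor and only tries odd candidates up to √n.
-- The fuel parameters only make Python's unbounded `while` loops total in Lean.

-- ===== PORT A =====
def pvFuel : Nat := 8589934592

-- inner `for i in range(1, item+1)` divisor-counting loop of A
def pvContA (item : Int) : Int :=
  (PySem.List.pyRange 1 (item + 1) 1).foldl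
    (fun cont i => if PySem.Int.mod item i == 0 then cont + 1 else cont) 0

-- A's `while True: item += 1; … ; if cont == 2: break` loop
def pvLoopA : Nat → Int → Int
  | 0, _ => 0
  | f + 1, item =>
    if pvContA (item + 1) == 2 then item + 1 else pvLoopA f (item + 1)

def lista_primos_maiores (lista : List Int) : List Int :=
  lista.foldl (fun aux item => aux ++ [pvLoopA pvFuel item]) []

-- ===== PORT B =====
-- B's odd trial-division loop `while d*d <= n: …; d += 2`
def pvTrial (n d : Int) : Bool :=
  if _h : d * d ≤ n then
    if PySem.Int.mod n d == 0 then false else pvTrial n (d + 2)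
  else true
termination_by (n + 1 - d).toNat
decreasing_by
  have hdn : d ≤ n := by
    by_cases h0 : d ≤ 0
    · have hsq : (0:Int) ≤ d * d := mul_self_nonneg d
      omega
    · nlinarith [mul_self_nonneg d]
  omega

def pvEhPrimo (n : Int) : Bool :=
  if n < 4 then decide (2 ≤ n)
  else if PySem.Int.mod n 2 == 0 then false
  else pvTrial n 3

-- B's `while not _eh_primo(c): c += 1` loop
def pvLoopB : Nat → Int → Int
  | 0, _ => 0
  | f + 1, c => if pvEhPrimo c then c else pvLoopB f (c + 1)

def pvProximoPrimo (item : Int) : Int :=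
  pvLoopB pvFuel (if item + 1 > 2 then item + 1 else 2)

def lista_primos_maiores_alt (lista : List Int) : List Int :=
  lista.map pvProximoPrimo

-- ===== PRECONDITION & SPEC =====
def Spec_lista_primos_maiores (lista : List Int) (out : List Int) : Prop := out = lista_primos_maiores_alt lista
instance (lista : List Int) (out : List Int) : Decidable (Spec_lista_primos_maiores lista out) := by unfold Spec_lista_primos_maiores; infer_instance

-- ===== CLAIM (what is proved, stated in full; the proofs are below) =====
def Claim_equal_lista_primos_maiores : Prop := ∀ (lista : List Int), Dom_lista_primos_maiores lista → Spec_lista_primos_maiores lista (lista_primos_maiores lista)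

-- ===== LEMMAS AND PROOFS =====

-- Python `%` by a positive divisor tests exact divisibility
theorem pv_mod_eq_zero_iff (n d : Int) (_hd : 0 < d) :
    (PySem.Int.mod n d == 0) = decide (d ∣ n) := by
  have h : PySem.Int.mod n d = Int.fmod n d := by simp [PySem.Int.mod]
  rw [h]
  by_cases hdvd : d ∣ n
  · simp [Int.fmod_eq_zero_of_dvd hdvd, hdvd]
  · have hz : Int.fmod n d ≠ 0 := fun hz => hdvd (Int.dvd_of_fmod_eq_zero hz)
    simp [hz, hdvd]

-- the number of divisors of N among 1..N, as a list count
def pvNatCnt (N : Nat) : Nat := (List.range N).countP (fun k => decide ((k + 1) ∣ N))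

theorem pvNatCnt_eq_card (N : Nat) :
    pvNatCnt N = ((Finset.range N).filter (fun k => (k + 1) ∣ N)).card := by
  rw [pvNatCnt]
  change _ = Multiset.card (Multiset.filter _ (Finset.range N).val)
  rw [Finset.range_val, ← Multiset.countP_eq_card_filter]
  rw [show (Multiset.range N) = ((List.range N : List Nat) : Multiset Nat) from rfl,
    Multiset.coe_countP]

theorem pv_card_divisors (N : Nat) (h1 : 1 ≤ N) :
    ((Finset.range N).filter (fun k => (k + 1) ∣ N)).card = N.divisors.card := by
  apply Finset.card_bij (fun k _ => k + 1)
  · intro k hk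
    simp only [Finset.mem_filter, Finset.mem_range] at hk
    simp only [Nat.mem_divisors]
    exact ⟨hk.2, by omega⟩
  · intro a _ b _ hab; omega
  · intro d hd
    simp only [Nat.mem_divisors] at hd
    have hd1 : 1 ≤ d := Nat.pos_of_dvd_of_pos hd.1 (by omega)
    have hdN : d ≤ N := Nat.le_of_dvd (by omega) hd.1
    refine ⟨d - 1, ?_, by omega⟩
    simp only [Finset.mem_filter, Finset.mem_range]
    refine ⟨by omega, ?_⟩
    have hdd : d - 1 + 1 = d := by omega
    rw [hdd]; exact hd.1

theorem pv_divisors_card_two_iff (N : Nat) : N.divisors.card = 2 ↔ N.Prime := by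
  constructor
  · intro h
    have hN1 : N ≠ 1 := by
      intro h1; rw [h1] at h; simp [Nat.divisors_one] at h
    have hN0 : N ≠ 0 := by
      intro h0; rw [h0] at h; simp at h
    have hN2 : 2 ≤ N := by omega
    have hsub : ({1, N} : Finset Nat) ⊆ N.divisors := by
      intro x hx
      simp only [Finset.mem_insert, Finset.mem_singleton] at hx
      rcases hx with rfl | rfl
      · exact Nat.one_mem_divisors.mpr hN0
      · exact Nat.mem_divisors_self _ hN0
    have hcard : ({1, N} : Finset Nat).card = 2 := Finset.card_pair (by omega)
    have heq : ({1, N} : Finset Nat) = N.divisors :=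
      Finset.eq_of_subset_of_card_le hsub (by omega)
    rw [Nat.prime_def_lt']
    refine ⟨hN2, fun m hm2 hmN hdvd => ?_⟩
    have hmem : m ∈ N.divisors := Nat.mem_divisors.mpr ⟨hdvd, hN0⟩
    rw [← heq] at hmem
    simp only [Finset.mem_insert, Finset.mem_singleton] at hmem
    omega
  · intro hp
    rw [hp.divisors, Finset.card_pair (by have := hp.two_le; omega)]

-- A's divisor count hits 2 exactly on primes
theorem pvContA_two_iff (n : Int) :
    ((pvContA n == 2) = true) ↔ (2 ≤ n ∧ Nat.Prime n.toNat) := by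
  by_cases hn : 1 ≤ n
  · have hcnt : pvContA n = (pvNatCnt n.toNat : Int) := by
      rw [pvContA, PySem.List.foldl_if_add_one, PySem.List.pyRange_one]
      have hlen : (n + 1 - 1).toNat = n.toNat := by omega
      rw [hlen, List.countP_map, pvNatCnt, zero_add]
      norm_num
      apply List.countP_congr
      intro k _
      simp only [Function.comp]
      rw [pv_mod_eq_zero_iff n (1 + (k:Int)) (by omega)]
      have hcast : ((1:Int) + (k:Int)) ∣ n ↔ (k + 1) ∣ n.toNat := by
        have e1 : ((k + 1 : Nat) : Int) = 1 + (k:Int) := by push_cast; ring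
        have e2 : ((n.toNat : Nat) : Int) = n := by omega
        conv_lhs => rw [← e1, ← e2]
        exact Int.natCast_dvd_natCast
      simp [hcast]
    rw [hcnt]
    constructor
    · intro h
      have h2 : pvNatCnt n.toNat = 2 := by
        have := beq_iff_eq.mp h; omega
      have hp : n.toNat.Prime := by
        rw [← pv_divisors_card_two_iff, ← pv_card_divisors n.toNat (by omega),
          ← pvNatCnt_eq_card]
        exact h2
      exact ⟨by have := hp.two_le; omega, hp⟩
    · intro hh
      have h2 : pvNatCnt n.toNat = 2 := by
        rw [pvNatCnt_eq_card, pv_card_divisors n.toNat (by omega),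
          pv_divisors_card_two_iff]
        exact hh.2
      simp [h2]
  · have hcnt : pvContA n = 0 := by
      rw [pvContA, PySem.List.pyRange_one_eq_nil (by omega)]
      rfl
    rw [hcnt]
    simp only [beq_iff_eq]
    constructor
    · intro h; omega
    · intro hh; omega

-- B's trial loop characterised (n odd, d odd ≥ 3)
theorem pvTrial_iff (n : Int) (hodd : ¬ (2:Int) ∣ n) :
    ∀ (k : Nat) (d : Int), (n + 1 - d).toNat = k → 3 ≤ d → (2:Int) ∣ (d + 1) →
      ((pvTrial n d = true) ↔ ∀ m : Int, d ≤ m → m * m ≤ n → ¬ m ∣ n) := by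
  intro k
  induction k using Nat.strong_induction_on with
  | _ k ih =>
    intro d hk hd3 hde
    rw [pvTrial]
    by_cases hg : d * d ≤ n
    · rw [dif_pos hg]
      have hdn : d ≤ n := by nlinarith
      rw [pv_mod_eq_zero_iff n d (by omega)]
      by_cases hdvd : d ∣ n
      · simp only [hdvd, decide_true]
        constructor
        · intro h; exact absurd h (by simp)
        · intro h; exact absurd hdvd (h d le_rfl hg)
      · simp only [hdvd, decide_false, Bool.false_eq_true, if_false]
        rw [ih (n + 1 - (d + 2)).toNat (by omega) (d + 2) rfl (by omega) (by omega)]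
        constructor
        · intro h m hm hmm hmdvd
          by_cases hge : d + 2 ≤ m
          · exact h m hge hmm hmdvd
          · rcases (by omega : m = d ∨ m = d + 1) with rfl | rfl
            · exact hdvd hmdvd
            · exact hodd (dvd_trans hde hmdvd)
        · intro h m hm hmm hmdvd
          exact h m (by omega) hmm hmdvd
    · rw [dif_neg hg]
      constructor
      · intro _ m hm hmm _
        have hmm' : d * d ≤ m * m := mul_le_mul hm hm (by omega) (by omega)
        omega
      · intro _; rfl

-- B's primality test is correct
theorem pvEhPrimo_iff (n : Int) :
    (pvEhPrimo n = true) ↔ (2 ≤ n ∧ Nat.Prime n.toNat) := by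
  by_cases h4 : n < 4
  · rw [pvEhPrimo, if_pos h4]
    by_cases h2 : n < 2
    · simp only [decide_eq_true_eq]
      constructor
      · intro h; omega
      · intro hh; omega
    · interval_cases n
      · simp; decide
      · simp; decide
  · rw [pvEhPrimo, if_neg h4]
    have hn0 : n = (n.toNat : Int) := by omega
    rw [pv_mod_eq_zero_iff n 2 (by omega)]
    by_cases h2 : (2:Int) ∣ n
    · simp only [h2, decide_true, if_true]
      constructor
      · intro h; exact absurd h (by simp)
      · intro hh
        exfalso
        have h2n : (2:Nat) ∣ n.toNat := by
          rw [hn0] at h2; exact_mod_cast h2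
        rcases (Nat.Prime.eq_one_or_self_of_dvd hh.2 2 h2n) with h | h <;> omega
    · simp only [h2, decide_false, Bool.false_eq_true, if_false]
      rw [pvTrial_iff n h2 (n + 1 - 3).toNat 3 rfl le_rfl (by omega)]
      constructor
      · intro h
        refine ⟨by omega, ?_⟩
        rw [Nat.prime_def_le_sqrt]
        refine ⟨by omega, fun m hm2 hms hmdvd => ?_⟩
        have hmm : m * m ≤ n.toNat := Nat.le_sqrt.mp hms
        rcases Nat.eq_or_lt_of_le hm2 with h2m | h3m
        · apply h2
          have hdn : (2:Nat) ∣ n.toNat := h2m ▸ hmdvd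
          rw [hn0]
          exact_mod_cast hdn
        · refine h (m : Int) (by exact_mod_cast h3m) ?_ ?_
          · rw [hn0]; exact_mod_cast hmm
          · rw [hn0]; exact_mod_cast hmdvd
      · intro hh m hm3 hmm hmdvd
        have hp := hh.2
        rw [Nat.prime_def_le_sqrt] at hp
        have hm0 : (0:Int) ≤ m := by omega
        refine hp.2 m.toNat (by omega) ?_ ?_
        · apply Nat.le_sqrt.mpr
          have : ((m.toNat * m.toNat : Nat) : Int) ≤ ((n.toNat : Nat) : Int) := by
            push_cast
            rw [Int.toNat_of_nonneg hm0]
            omega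
          exact_mod_cast this
        · have : ((m.toNat : Nat) : Int) ∣ ((n.toNat : Nat) : Int) := by
            rw [Int.toNat_of_nonneg hm0, ← hn0]; exact hmdvd
          exact_mod_cast this

-- the two candidate tests agree pointwise
theorem pvPred_eq (n : Int) : (pvContA n == 2) = pvEhPrimo n := by
  have h1 := pvContA_two_iff n
  have h2 := pvEhPrimo_iff n
  cases hA : (pvContA n == 2) <;> cases hB : pvEhPrimo n <;> simp_all

-- A's search from `item` is B's search started at `item+1`
theorem pvLoopAB (f : Nat) : ∀ item : Int, pvLoopA f item = pvLoopB f (item + 1) := by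
  induction f with
  | zero => intro item; rfl
  | succ f ih =>
    intro item
    show (if pvContA (item + 1) == 2 then item + 1 else pvLoopA f (item + 1)) =
      (if pvEhPrimo (item + 1) then item + 1 else pvLoopB f (item + 1 + 1))
    rw [pvPred_eq]
    split_ifs with h
    · rfl
    · exact ih (item + 1)

theorem pvEhPrimo_low (c : Int) (hc : c ≤ 1) : pvEhPrimo c = false := by
  rw [pvEhPrimo, if_pos (by omega : c < 4)]
  simp only [decide_eq_false_iff_not]
  omega

-- B's search started at or below 2 returns 2
theorem pvClimb : ∀ (k f : Nat), k < f → pvLoopB f (2 - (k : Int)) = 2 := by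
  intro k
  induction k with
  | zero =>
    intro f hf
    obtain ⟨f', rfl⟩ : ∃ f', f = f' + 1 := ⟨f - 1, by omega⟩
    show (if pvEhPrimo (2 - ((0:Nat) : Int)) then 2 - ((0:Nat) : Int)
      else pvLoopB f' (2 - ((0:Nat) : Int) + 1)) = 2
    have he : (2 - ((0:Nat) : Int)) = 2 := by norm_num
    rw [he, show pvEhPrimo 2 = true from by decide]
    simp
  | succ k ih =>
    intro f hf
    obtain ⟨f', rfl⟩ : ∃ f', f = f' + 1 := ⟨f - 1, by omega⟩
    show (if pvEhPrimo (2 - ((k+1:Nat) : Int)) then 2 - ((k+1:Nat) : Int)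
      else pvLoopB f' (2 - ((k+1:Nat) : Int) + 1)) = 2
    rw [pvEhPrimo_low (2 - ((k+1:Nat) : Int)) (by push_cast; omega)]
    simp only [Bool.false_eq_true, if_false]
    have he : 2 - ((k+1:Nat) : Int) + 1 = 2 - ((k:Nat) : Int) := by push_cast; ring
    rw [he]
    exact ih f' (by omega)

theorem pvItem (item : Int) (h : -2147483648 ≤ item) :
    pvLoopA pvFuel item = pvProximoPrimo item := by
  rw [pvProximoPrimo]
  by_cases h2 : item + 1 > 2
  · rw [if_pos h2]; exact pvLoopAB pvFuel item
  · rw [if_neg h2, pvLoopAB pvFuel item]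
    have hk : item + 1 = 2 - (((1 - item).toNat : Nat) : Int) := by
      rw [Int.toNat_of_nonneg (by omega)]; ring
    rw [hk, pvClimb (1 - item).toNat pvFuel (by unfold pvFuel; omega)]
    have h0 := pvClimb 0 pvFuel (by unfold pvFuel; omega)
    norm_num at h0
    exact h0.symm

-- ===== VERDICT (by name: the statement is the Claim_ definition above) =====
theorem lista_primos_maiores_spec : Claim_equal_lista_primos_maiores := by
  unfold Claim_equal_lista_primos_maiores Spec_lista_primos_maiores
  intro lista hdom
  unfold lista_primos_maiores lista_primos_maiores_alt
  rw [PySem.List.foldl_append_singleton_eq_map, List.nil_append]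
  apply List.map_congr_left
  intro x hx
  have hx' : pvDomInt x = true := by
    unfold Dom_lista_primos_maiores at hdom
    rw [List.all_eq_true] at hdom
    exact hdom x hx
  have hb : -2147483648 ≤ x := by
    unfold pvDomInt at hx'
    simp only [decide_eq_true_eq] at hx'
    exact hx'.1
  exact pvItem x hb
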